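-- pv_equiv track=rewrite | github.com/MuhammadAhmadBrainstormerTech/Tod-Assistant | main.py | extract_relevant_section
-- ===== SOURCE A (Python) =====
-- def extract_relevant_section(extracted_text, query):
--     """Extract the most relevant heading and its related paragraphs."""
--     lines = extracted_text.split("\n")
--     relevant_heading = None
--     relevant_paragraphs = []
--
--     for line in lines:
--         # Detect headings (h1, h2, etc.)
--         if line.lower().startswith(("h1:", "h2:", "h3:", "h4:", "h5:", "h6:")):
--             relevant_heading = line  # Store the heading
--         elif relevant_heading and len(line.split()) > 5:  # Ensure it's a paragraph
--             if any(keyword in relevant_heading.lower() for keyword in query.lower().split()):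
--                 relevant_paragraphs.append(line)
--
--     return "\n".join(relevant_paragraphs) if relevant_paragraphs else extracted_text
-- ===== SOURCE B (Python) =====
-- def _is_heading(line):
--     return line.lower().startswith(("h1:", "h2:", "h3:", "h4:", "h5:", "h6:"))
--
-- def _group(lines):
--     """Group into (heading, body-lines) sections; lines before the first heading are dropped."""
--     sections = []
--     i = 0
--     n = len(lines)
--     while i < n:
--         if not _is_heading(lines[i]):
--             i += 1
--             continue
--         j = i + 1
--         while j < n and not _is_heading(lines[j]):
--             j += 1
--         sections.append((lines[i], lines[i + 1:j]))
--         i = j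
--     return sections
--
-- def extract_relevant_section(extracted_text, query):
--     """Extract the most relevant heading and its related paragraphs."""
--     keywords = query.lower().split()
--     result = []
--     for heading, body in _group(extracted_text.split("\n")):
--         h = heading.lower()
--         if any(k in h for k in keywords):
--             result.extend(l for l in body if len(l.split()) > 5)
--     return "\n".join(result) if result else extracted_text
-- ===== Notes on version B (the rewrite author's own statement) =====
-- stated objective: alternative
-- what changed: Replaces A's single stateful pass (current-heading variable mutated while filtering) by a two-phase decomposition: first group lines into (heading, body) sections, then filter the bodies of keyword-matching sections.
import Mathlib
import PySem

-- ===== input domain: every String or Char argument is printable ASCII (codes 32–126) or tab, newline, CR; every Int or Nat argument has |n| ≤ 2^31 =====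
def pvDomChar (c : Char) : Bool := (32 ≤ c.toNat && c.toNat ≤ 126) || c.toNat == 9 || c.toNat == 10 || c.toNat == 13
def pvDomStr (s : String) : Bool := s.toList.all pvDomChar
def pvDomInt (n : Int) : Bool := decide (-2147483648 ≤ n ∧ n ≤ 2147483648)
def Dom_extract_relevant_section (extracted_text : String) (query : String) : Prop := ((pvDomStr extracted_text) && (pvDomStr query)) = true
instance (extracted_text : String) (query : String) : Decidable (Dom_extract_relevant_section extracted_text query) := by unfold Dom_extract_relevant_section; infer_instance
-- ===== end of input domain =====

-- B replaces A's single stateful pass (current-heading variable) by a two-phase decomposition: group lines into (heading, body) sections, then filter matching sections' bodies (objective: alternative).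


-- ===== PORT A =====
-- line.lower().startswith(("h1:", …, "h6:"))
def pvIsHeading (line : String) : Bool :=
  let l := PySem.Str.lower line
  PySem.Str.startswith l "h1:" || PySem.Str.startswith l "h2:" || PySem.Str.startswith l "h3:" ||
  PySem.Str.startswith l "h4:" || PySem.Str.startswith l "h5:" || PySem.Str.startswith l "h6:"

-- s.split("\n"); the separator is the non-empty literal "\n", so split? is always `some` and getD is exact
def pvSplitNL (s : String) : List String := (PySem.Str.split? s "\n").getD []

-- A's loop body: state = (relevant_heading, relevant_paragraphs)
def pvStepA (query : String) (st : Option String × List String) (line : String) : Option String × List String :=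
  if pvIsHeading line then (some line, st.2)
  else if st.1.isSome && decide ((PySem.Str.split₀ line).length > 5) then
    match st.1 with
    | some h =>
      if (PySem.Str.split₀ (PySem.Str.lower query)).any (fun k => PySem.Str.isIn k (PySem.Str.lower h)) then
        (st.1, st.2 ++ [line])
      else st
    | none => st
  else st

def extract_relevant_section (extracted_text : String) (query : String) : String :=
  let lines := pvSplitNL extracted_text
  let st := lines.foldl (pvStepA query) (none, [])
  if st.2 ≠ [] then PySem.Str.join "\n" st.2 else extracted_text

-- ===== PORT B =====
-- _group: the inner 'while j < n and not _is_heading(lines[j])' scan + slice lines[i+1:j] is takeWhile,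
-- advancing i to j is dropWhile; the outer while is this structural recursion.
def pvGroup : List String → List (String × List String)
  | [] => []
  | l :: rest =>
    if pvIsHeading l then
      (l, rest.takeWhile (fun x => !pvIsHeading x)) :: pvGroup (rest.dropWhile (fun x => !pvIsHeading x))
    else pvGroup rest
termination_by lines => lines.length
decreasing_by
  · simpa using Nat.lt_succ_of_le (List.length_dropWhile_le _ _)
  · simp

def extract_relevant_section_alt (extracted_text : String) (query : String) : String :=
  let keywords := PySem.Str.split₀ (PySem.Str.lower query)
  let result := (pvGroup (pvSplitNL extracted_text)).foldl
    (fun acc sec =>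
      if keywords.any (fun k => PySem.Str.isIn k (PySem.Str.lower sec.1)) then
        acc ++ sec.2.filter (fun l => decide ((PySem.Str.split₀ l).length > 5))
      else acc) []
  if result ≠ [] then PySem.Str.join "\n" result else extracted_text

-- ===== PRECONDITION & SPEC =====
def Spec_extract_relevant_section (extracted_text : String) (query : String) (out : String) : Prop := out = extract_relevant_section_alt extracted_text query
instance (extracted_text : String) (query : String) (out : String) : Decidable (Spec_extract_relevant_section extracted_text query out) := by unfold Spec_extract_relevant_section; infer_instance

-- ===== CLAIM (what is proved, stated in full; the proofs are below) =====
def Claim_equal_extract_relevant_section : Prop := ∀ (extracted_text : String) (query : String), Dom_extract_relevant_section extracted_text query → Spec_extract_relevant_section extracted_text query (extract_relevant_section extracted_text query)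

-- ===== LEMMAS AND PROOFS =====

-- shorthand for the proofs (not used by the ports/claim)
def pvMatch (query h : String) : Bool :=
  (PySem.Str.split₀ (PySem.Str.lower query)).any (fun k => PySem.Str.isIn k (PySem.Str.lower h))

def pvGood (l : String) : Bool := decide ((PySem.Str.split₀ l).length > 5)

def pvCollect (query : String) (secs : List (String × List String)) : List String :=
  secs.flatMap (fun sec => if pvMatch query sec.1 then sec.2.filter pvGood else [])

theorem pvGroup_cons (l : String) (rest : List String) :
    pvGroup (l :: rest) =
      if pvIsHeading l then
        (l, rest.takeWhile (fun x => !pvIsHeading x)) :: pvGroup (rest.dropWhile (fun x => !pvIsHeading x))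
      else pvGroup rest := by
  rw [pvGroup]

theorem pvCollect_cons (query : String) (s : String × List String) (rest : List (String × List String)) :
    pvCollect query (s :: rest) =
      (if pvMatch query s.1 then s.2.filter pvGood else []) ++ pvCollect query rest := by
  simp [pvCollect]

theorem pvFoldA_some (query : String) (lines : List String) :
    ∀ (h : String) (acc : List String),
    (lines.foldl (pvStepA query) (some h, acc)).2 =
      acc ++ (if pvMatch query h then (lines.takeWhile (fun x => !pvIsHeading x)).filter pvGood else [])
          ++ pvCollect query (pvGroup (lines.dropWhile (fun x => !pvIsHeading x))) := by
  induction lines with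
  | nil => intro h acc; simp [pvCollect, pvGroup]
  | cons l rest ih =>
    intro h acc
    by_cases hl : pvIsHeading l = true
    · simp only [List.foldl_cons, pvStepA, hl, if_true, List.takeWhile_cons, List.dropWhile_cons,
        Bool.not_true, Bool.false_eq_true, if_false]
      rw [ih l acc, pvGroup_cons]
      simp [hl, pvCollect_cons, pvMatch, List.append_assoc]
    · simp only [Bool.not_eq_true] at hl
      simp only [List.foldl_cons, pvStepA, hl, Bool.false_eq_true, if_false, List.takeWhile_cons,
        List.dropWhile_cons, Bool.not_false, if_true, Option.isSome_some, Bool.true_and]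
      by_cases hg : pvGood l = true
      · simp only [pvGood] at hg
        simp only [hg, if_true]
        by_cases hm : pvMatch query h = true
        · simp only [pvMatch] at hm
          simp only [hm, if_true]
          rw [ih h (acc ++ [l])]
          simp only [pvMatch, hm, if_true, List.filter_cons, pvGood, hg, List.append_assoc,
            List.singleton_append]
        · simp only [Bool.not_eq_true, pvMatch] at hm
          simp only [hm, Bool.false_eq_true, if_false]
          rw [ih h acc]
          simp only [pvMatch, hm, Bool.false_eq_true, if_false]
      · simp only [Bool.not_eq_true, pvGood] at hg
        simp only [hg, Bool.false_eq_true, if_false]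
        rw [ih h acc]
        by_cases hm : pvMatch query h = true
        · simp only [pvMatch] at hm
          simp only [pvMatch, hm, if_true, List.filter_cons, pvGood, hg, Bool.false_eq_true,
            if_false]
        · simp only [Bool.not_eq_true, pvMatch] at hm
          simp only [pvMatch, hm, Bool.false_eq_true, if_false]

theorem pvFoldA_none (query : String) (lines : List String) :
    ∀ (acc : List String),
    (lines.foldl (pvStepA query) (none, acc)).2 = acc ++ pvCollect query (pvGroup lines) := by
  induction lines with
  | nil => intro acc; simp [pvCollect, pvGroup]
  | cons l rest ih =>
    intro acc
    by_cases hl : pvIsHeading l = true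
    · simp only [List.foldl_cons, pvStepA, hl, if_true]
      rw [pvFoldA_some query rest l acc, pvGroup_cons]
      simp only [hl, if_true, pvCollect_cons, pvMatch, List.append_assoc]
      rfl
    · simp only [Bool.not_eq_true] at hl
      simp only [List.foldl_cons, pvStepA, hl, Bool.false_eq_true, if_false, Option.isSome_none,
        Bool.false_and]
      rw [ih acc, pvGroup_cons]
      simp only [hl, Bool.false_eq_true, if_false]

theorem pvFoldB_eq (query : String) (secs : List (String × List String)) :
    secs.foldl (fun acc sec =>
      if (PySem.Str.split₀ (PySem.Str.lower query)).any (fun k => PySem.Str.isIn k (PySem.Str.lower sec.1)) then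
        acc ++ sec.2.filter (fun l => decide ((PySem.Str.split₀ l).length > 5))
      else acc) [] = pvCollect query secs := by
  have key : ∀ (l : List (String × List String)) (acc : List String),
      l.foldl (fun acc sec =>
        if (PySem.Str.split₀ (PySem.Str.lower query)).any (fun k => PySem.Str.isIn k (PySem.Str.lower sec.1)) then
          acc ++ sec.2.filter (fun l => decide ((PySem.Str.split₀ l).length > 5))
        else acc) acc = acc ++ pvCollect query l := by
    intro l
    induction l with
    | nil => intro acc; simp [pvCollect]
    | cons s rest ih =>
      intro acc
      simp only [List.foldl_cons]
      by_cases hm : pvMatch query s.1 = true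
      · simp only [pvMatch] at hm
        simp only [hm, if_true]
        rw [ih, pvCollect_cons]
        simp only [pvMatch, hm, if_true, List.append_assoc]
        rfl
      · simp only [Bool.not_eq_true, pvMatch] at hm
        simp only [hm, Bool.false_eq_true, if_false]
        rw [ih, pvCollect_cons]
        simp only [pvMatch, hm, Bool.false_eq_true, if_false, List.nil_append]
  simpa using key secs []

-- ===== VERDICT (by name: the statement is the Claim_ definition above) =====
theorem extract_relevant_section_spec : Claim_equal_extract_relevant_section := by
  intro et q _
  show extract_relevant_section et q = extract_relevant_section_alt et q
  simp only [extract_relevant_section, extract_relevant_section_alt, pvFoldA_none, pvFoldB_eq,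
    List.nil_append]
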